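-- pv_equiv track=rewrite | github.com/katiek3/DATA-STRUCTURES | Reverse.py | reverse_list_string
-- ===== SOURCE A (Python) =====
-- def reverse_list_string(data: list[str], tab_by: int) -> str | None:
--     if data is None or len(data) == 0:
--         return None
--     NEWLINE = "\n"
--     string = ""
--     indent = 0
--
--     for item in data:
--         if string == "":
--             string = item
--         else:
--             string = item + NEWLINE + (" " * indent) + string
--         indent += tab_by
--     return string
-- ===== SOURCE B (Python) =====
-- def reverse_list_string(data: list[str], tab_by: int) -> str | None:
--     if not data:
--         return None
--     n = len(data)
--     lines = []
--     for j, item in enumerate(reversed(data)):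
--         lines.append(item if j == 0 else " " * ((n - j) * tab_by) + item)
--     return "\n".join(lines)
-- ===== Notes on version B (the rewrite author's own statement) =====
-- stated objective: alternative
-- what changed: Instead of prepending each item to a growing string with a running indent counter, B computes each output line independently (item at original index i gets (i+1)*tab_by spaces, the last item none) over the reversed list and joins them once with '\n'.
-- intended difference: On lists of length >= 2 whose first element is the empty string, A's 'string == ""' test misfires and silently drops the leading empty items' lines (e.g. A(['','x'],1) = 'x'), while B keeps a (indented, empty) line for them ('x\n '), which is the intended output since an empty item is still an item. — e.g. on reverse_list_string(["", "x"], 1): A returns some "x", B returns some "x\n "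
import Mathlib
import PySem

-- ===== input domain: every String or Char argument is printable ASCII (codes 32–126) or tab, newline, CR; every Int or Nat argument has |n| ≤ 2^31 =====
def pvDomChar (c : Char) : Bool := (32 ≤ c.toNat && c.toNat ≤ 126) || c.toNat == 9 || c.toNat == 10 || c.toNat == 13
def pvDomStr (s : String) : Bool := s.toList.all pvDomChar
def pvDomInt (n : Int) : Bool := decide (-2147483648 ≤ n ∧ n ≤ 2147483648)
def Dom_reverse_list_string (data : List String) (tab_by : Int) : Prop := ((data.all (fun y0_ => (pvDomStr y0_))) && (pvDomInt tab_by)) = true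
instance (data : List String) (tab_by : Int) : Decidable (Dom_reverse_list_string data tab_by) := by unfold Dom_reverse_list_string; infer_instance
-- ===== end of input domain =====

-- B builds each output line independently ((i+1)*tab_by spaces before item i, none before the last) and joins once,
-- instead of A's running-indent string prepending; B also keeps lines for leading empty items that A silently drops (see D_).


-- ===== PORT A =====
-- " " * i  (Python string repetition; empty for i ≤ 0); shared by both Pythons
def pvSpaces (i : Int) : List Char := PySem.List.pyRepeat [' '] i

-- one iteration of A's loop: state = (string, indent)
def pvStep (tab_by : Int) (st : List Char × Int) (item : String) : List Char × Int :=
  (if st.1 = [] then item.toList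
   else item.toList ++ ['\n'] ++ pvSpaces st.2 ++ st.1,
   st.2 + tab_by)

def reverse_list_string (data : List String) (tab_by : Int) : Option String :=
  if data.length = 0 then none
  else some (String.ofList (data.foldl (pvStep tab_by) ([], 0)).1)

-- ===== PORT B =====
-- the line for (j, item) of enumerate(reversed(data)), n = len(data)
def pvLine (n tab_by : Int) (ji : Int × String) : List Char :=
  if ji.1 = 0 then ji.2.toList
  else pvSpaces ((n - ji.1) * tab_by) ++ ji.2.toList

def reverse_list_string_alt (data : List String) (tab_by : Int) : Option String :=
  if data.isEmpty then none
  else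
    some (String.ofList (PySem.Chars.join ['\n']
      ((PySem.List.enumerate data.reverse 0).map (pvLine (data.length : Int) tab_by))))

-- ===== PRECONDITION & SPEC =====
-- On lists of length ≥ 2 starting with "", A's `string == ""` test misfires and drops the leading empty items'
-- lines (A(["","x"],1) = "x"), while B keeps an (indented, empty) line for them ("x\n "), the intended output.
def D_reverse_list_string (data : List String) (tab_by : Int) : Prop :=
  2 ≤ data.length ∧ data.head? = some ""
instance (data : List String) (tab_by : Int) : Decidable (D_reverse_list_string data tab_by) := by unfold D_reverse_list_string; infer_instance

def Spec_reverse_list_string (data : List String) (tab_by : Int) (out : Option String) : Prop := ¬ D_reverse_list_string data tab_by → out = reverse_list_string_alt data tab_by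
instance (data : List String) (tab_by : Int) (out : Option String) : Decidable (Spec_reverse_list_string data tab_by out) := by unfold Spec_reverse_list_string; infer_instance

def pvDiffWitness_reverse_list_string : List String × Int := (["", "x"], 1)
def pvDiffWitnessOut_reverse_list_string : (Option String) × (Option String) := (some "x", some "x\n ")

-- ===== CLAIM (what is proved, stated in full; the proofs are below) =====
def Claim_unchanged_reverse_list_string : Prop := ∀ (data : List String) (tab_by : Int), Dom_reverse_list_string data tab_by → Spec_reverse_list_string data tab_by (reverse_list_string data tab_by)
def Claim_changed_reverse_list_string : Prop := Dom_reverse_list_string (pvDiffWitness_reverse_list_string.1) (pvDiffWitness_reverse_list_string.2) ∧ D_reverse_list_string (pvDiffWitness_reverse_list_string.1) (pvDiffWitness_reverse_list_string.2) ∧ reverse_list_string (pvDiffWitness_reverse_list_string.1) (pvDiffWitness_reverse_list_string.2) = pvDiffWitnessOut_reverse_list_string.1 ∧ reverse_list_string_alt (pvDiffWitness_reverse_list_string.1) (pvDiffWitness_reverse_list_string.2) = pvDiffWitnessOut_reverse_list_string.2 ∧ pvDiffWitnessOut_reverse_list_string.1 ≠ pvDiffWitnessOut_reverse_list_string.2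
def Claim_exact_reverse_list_string : Prop := ∀ (data : List String) (tab_by : Int), Dom_reverse_list_string data tab_by → D_reverse_list_string data tab_by → reverse_list_string data tab_by ≠ reverse_list_string_alt data tab_by

-- ===== LEMMAS AND PROOFS =====

-- the string A has built after the items `rest` were prepended onto a nonempty string, starting at indent `ind`
def pvTS (t : Int) : List String → Int → List Char
  | [], _ => []
  | x :: xs, ind => pvTS t xs (ind + t) ++ x.toList ++ ['\n'] ++ pvSpaces ind

lemma foldA (t : Int) (rest : List String) : ∀ (s : List Char) (ind : Int), s ≠ [] →
    (rest.foldl (pvStep t) (s, ind)).1 = pvTS t rest ind ++ s := by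
  induction rest with
  | nil => intro s ind _; simp [pvTS]
  | cons x xs ih =>
    intro s ind hs
    have hstep : pvStep t (s, ind) x = (x.toList ++ ['\n'] ++ pvSpaces ind ++ s, ind + t) := by
      simp [pvStep, hs]
    rw [List.foldl_cons, hstep, ih _ _ (by simp)]
    simp [pvTS, List.append_assoc]

lemma pvTS_snoc (t : Int) (y : String) : ∀ (xs : List String) (ind : Int),
    pvTS t (xs ++ [y]) ind = y.toList ++ ['\n'] ++ pvSpaces (ind + (xs.length : Int) * t) ++ pvTS t xs ind := by
  intro xs
  induction xs with
  | nil => intro ind; simp [pvTS]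
  | cons x xs ih =>
    intro ind
    have harg : ind + t + (xs.length : Int) * t = ind + ((xs.length : Int) + 1) * t := by ring
    simp only [List.cons_append, pvTS, ih, harg]
    simp [List.append_assoc]

lemma join_prefix (sep p a : List Char) (l : List (List Char)) :
    PySem.Chars.join sep ((p ++ a) :: l) = p ++ PySem.Chars.join sep (a :: l) := by
  cases l with
  | nil => simp [PySem.Chars.join_singleton]
  | cons b l' => simp [PySem.Chars.join_cons_cons, List.append_assoc]

lemma line_shift (n' t : Int) (L : List String) : ∀ (j : Int), 1 ≤ j →
    (PySem.List.enumerate L (j + 1)).map (pvLine (n' + 1) t) =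
    (PySem.List.enumerate L j).map (pvLine n' t) := by
  induction L with
  | nil => intro j _; simp [PySem.List.enumerate_nil]
  | cons a L' ih =>
    intro j hj
    rw [PySem.List.enumerate_cons, PySem.List.enumerate_cons]
    simp only [List.map_cons]
    have h1 : pvLine (n' + 1) t (j + 1, a) = pvLine n' t (j, a) := by
      have hj1 : ¬ (j + 1 = 0) := by omega
      have hj0 : ¬ (j = 0) := by omega
      have harg : (n' + 1 - (j + 1)) * t = (n' - j) * t := by ring
      simp only [pvLine, if_neg hj1, if_neg hj0, harg]
    rw [h1, ih (j + 1) (by omega)]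

lemma joinB (t : Int) (rest : List String) : ∀ (d0 : String),
    PySem.Chars.join ['\n']
      ((PySem.List.enumerate (d0 :: rest).reverse 0).map (pvLine ((rest.length : Int) + 1) t)) =
    pvTS t rest t ++ d0.toList := by
  induction rest using List.reverseRecOn with
  | nil =>
    intro d0
    simp [PySem.List.enumerate_cons, PySem.List.enumerate_nil, pvLine, pvTS,
      PySem.Chars.join_singleton]
  | append_singleton xs y ih =>
    intro d0
    have hrev : (d0 :: (xs ++ [y])).reverse = y :: (d0 :: xs).reverse := by simp
    obtain ⟨z, L', hz⟩ : ∃ z L', (d0 :: xs).reverse = z :: L' := by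
      cases h : (d0 :: xs).reverse with
      | nil => exact absurd (congrArg List.length h) (by simp)
      | cons a b => exact ⟨a, b, rfl⟩
    have hlen : (((xs ++ [y]).length : Int)) + 1 = ((xs.length : Int) + 1) + 1 := by
      simp [List.length_append]
    rw [hrev, hz, hlen, PySem.List.enumerate_cons, PySem.List.enumerate_cons]
    simp only [List.map_cons]
    have h0 : pvLine (((xs.length : Int) + 1) + 1) t (0, y) = y.toList := by simp [pvLine]
    have h1 : pvLine (((xs.length : Int) + 1) + 1) t (0 + 1, z)
        = pvSpaces (((xs.length : Int) + 1) * t) ++ z.toList := by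
      have hne : ¬((0 : Int) + 1 = 0) := by omega
      have harg : ((((xs.length : Int) + 1) + 1) - (0 + 1)) * t = ((xs.length : Int) + 1) * t := by ring
      simp only [pvLine, if_neg hne, harg]
    have hshift : (PySem.List.enumerate L' (0 + 1 + 1)).map (pvLine (((xs.length : Int) + 1) + 1) t)
        = (PySem.List.enumerate L' (0 + 1)).map (pvLine ((xs.length : Int) + 1) t) := by
      have := line_shift ((xs.length : Int) + 1) t L' 1 (le_refl 1)
      norm_num at this ⊢
      exact this
    rw [h0, h1, hshift, PySem.Chars.join_cons_cons, join_prefix]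
    have hz' : pvLine ((xs.length : Int) + 1) t (0, z) = z.toList := by simp [pvLine]
    have hjoin : (z.toList :: (PySem.List.enumerate L' (0 + 1)).map (pvLine ((xs.length : Int) + 1) t))
        = (PySem.List.enumerate (z :: L') 0).map (pvLine ((xs.length : Int) + 1) t) := by
      rw [PySem.List.enumerate_cons, List.map_cons, hz']
    have hsnoc := pvTS_snoc t y xs t
    have harg2 : t + (xs.length : Int) * t = ((xs.length : Int) + 1) * t := by ring
    rw [harg2] at hsnoc
    rw [hjoin, ← hz, ih d0, hsnoc]
    simp [List.append_assoc]

-- A=B on nonempty data whose first item is not dropped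
lemma main_ne (data : List String) (t : Int) (d0 : String) (rest : List String)
    (hd : data = d0 :: rest) (h0 : d0.toList ≠ []) :
    reverse_list_string data t = reverse_list_string_alt data t := by
  subst hd
  have hA : ((d0 :: rest).foldl (pvStep t) ([], 0)).1 = pvTS t rest t ++ d0.toList := by
    rw [List.foldl_cons]
    have hstep : pvStep t (([] : List Char), 0) d0 = (d0.toList, 0 + t) := by simp [pvStep]
    rw [hstep]
    rw [foldA t rest d0.toList (0 + t) h0]
    norm_num
  simp only [reverse_list_string, reverse_list_string_alt, List.length_cons, List.isEmpty_cons]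
  rw [hA]
  have := joinB t rest d0
  push_cast
  rw [this]

-- A's string after folding over l from the empty string is strictly shorter than the full pvTS block
lemma lenA (t : Int) (l : List String) : ∀ (ind : Int), l ≠ [] →
    ((l.foldl (pvStep t) (([] : List Char), ind)).1).length < (pvTS t l ind).length := by
  induction l with
  | nil => intro ind h; exact absurd rfl h
  | cons x xs ih =>
    intro ind _
    have hstep : pvStep t (([] : List Char), ind) x = (x.toList, ind + t) := by
      simp [pvStep]
    rw [List.foldl_cons, hstep]
    have hTS : (pvTS t (x :: xs) ind).length
        = (pvTS t xs (ind + t)).length + x.toList.length + 1 + (pvSpaces ind).length := by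
      simp [pvTS]; omega
    by_cases hx : x.toList = []
    · rw [hx]
      rcases eq_or_ne xs [] with hxs | hxs
      · subst hxs; simp [pvTS, hx]
      · have := ih (ind + t) hxs
        omega
    · rw [foldA t xs x.toList (ind + t) hx]
      simp only [List.length_append]
      omega

-- ===== VERDICT (by name: the statement is the Claim_ definition above) =====
theorem reverse_list_string_spec : Claim_unchanged_reverse_list_string := by
  intro data t _ hD
  cases data with
  | nil => simp [reverse_list_string, reverse_list_string_alt]
  | cons d0 rest =>
    cases rest with
    | nil =>
      simp [reverse_list_string, reverse_list_string_alt, pvStep,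
        pvLine, PySem.List.enumerate_cons, PySem.List.enumerate_nil, PySem.Chars.join_singleton]
    | cons d1 rest' =>
      have h0 : d0 ≠ "" := by
        intro h
        exact hD ⟨by simp, by simp [h]⟩
      exact main_ne _ t d0 (d1 :: rest') rfl (by simpa using h0)

theorem reverse_list_string_changed : Claim_changed_reverse_list_string := by
  unfold Claim_changed_reverse_list_string; decide

theorem reverse_list_string_tight : Claim_exact_reverse_list_string := by
  intro data t _ hD
  obtain ⟨hlen2, hhead⟩ := hD
  cases data with
  | nil => simp at hlen2
  | cons d0 rest =>
    have hd0 : d0 = "" := by simpa using hhead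
    have hrest : rest ≠ [] := by
      intro h; rw [h] at hlen2; simp at hlen2
    have hA : reverse_list_string (d0 :: rest) t
        = some (String.ofList (rest.foldl (pvStep t) (([] : List Char), 0 + t)).1) := by
      simp only [reverse_list_string, List.length_cons, List.foldl_cons]
      have hstep : pvStep t (([] : List Char), 0) d0 = ([], 0 + t) := by simp [pvStep, hd0]
      rw [hstep]
      simp
    have hB : reverse_list_string_alt (d0 :: rest) t = some (String.ofList (pvTS t rest t)) := by
      simp only [reverse_list_string_alt, List.isEmpty_cons]
      have hcast : (((d0 :: rest).length : Nat) : Int) = (rest.length : Int) + 1 := by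
        simp
      rw [hcast, joinB t rest d0, hd0]
      simp
    intro heq
    rw [hA, hB] at heq
    have hXY : (rest.foldl (pvStep t) (([] : List Char), 0 + t)).1 = pvTS t rest t := by
      simpa using congrArg (fun o => Option.map String.toList o) heq
    have hlt := lenA t rest (0 + t) hrest
    have h0t : (0 : Int) + t = t := by ring
    rw [h0t] at hXY hlt
    rw [hXY] at hlt
    omega
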